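-- pv_equiv track=rewrite | github.com/aaaasule/test_fastapi | app/fid/utils/parse_search_id.py | parse_interface_code
-- ===== SOURCE A (Python) =====
-- def parse_interface_code(code: str) -> dict:
--     if not isinstance(code, str):
--         code = str(code)
--
--     parts = code.split(';', 3)  # 最多分割3次 → 得到最多4个部分
--
--     # 确保有4个元素，不足则补空字符串
--     while len(parts) < 4:
--         parts.append('')
--
--     return {
--         'sub_system': parts[0],
--         'building_level': parts[1],
--         'field': parts[2],
--         'id': parts[3]
--     }
-- ===== SOURCE B (Python) =====
-- def parse_interface_code(code: str) -> dict:
--     if not isinstance(code, str):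
--         code = str(code)
--
--     # Single left-to-right character scan (state machine): k counts the
--     # separators consumed (max 3); each character is appended to the current
--     # field buffer, so missing fields stay '' and extra ';' lands in id.
--     f0 = f1 = f2 = f3 = ''
--     k = 0
--     for ch in code:
--         if ch == ';' and k < 3:
--             k += 1
--         elif k == 0:
--             f0 += ch
--         elif k == 1:
--             f1 += ch
--         elif k == 2:
--             f2 += ch
--         else:
--             f3 += ch
--
--     return {'sub_system': f0, 'building_level': f1, 'field': f2, 'id': f3}
-- ===== Notes on version B (the rewrite author's own statement) =====
-- stated objective: alternative
-- what changed: Replaces split(';',3) plus a while-loop padding the list to 4 with a single character-by-character state machine: a separator counter k and four field buffers, each character appended to the current buffer, so missing fields stay '' and extra ';' accumulates in id with no list or length bookkeeping.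
import Mathlib
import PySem

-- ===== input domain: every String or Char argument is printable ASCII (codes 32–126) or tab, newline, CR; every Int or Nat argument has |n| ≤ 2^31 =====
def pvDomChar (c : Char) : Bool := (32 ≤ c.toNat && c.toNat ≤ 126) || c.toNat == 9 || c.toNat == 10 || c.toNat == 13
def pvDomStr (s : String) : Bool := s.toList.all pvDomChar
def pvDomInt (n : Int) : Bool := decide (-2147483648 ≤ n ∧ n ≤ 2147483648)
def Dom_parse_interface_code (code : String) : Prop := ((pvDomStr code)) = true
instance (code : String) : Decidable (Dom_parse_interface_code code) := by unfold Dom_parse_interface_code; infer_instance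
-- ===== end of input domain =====

-- B replaces split(';',3) + a while loop padding to 4 with a single character scan
-- keeping a separator counter and four field buffers (alternative decomposition, same cost).

-- ===== PORT A =====
-- the `while len(parts) < 4: parts.append('')` loop; it runs at most 4 times, the
-- fuel argument 4 only makes that bound explicit (it is never hit with a shorter list)
def pvPadLoop : Nat → List String → List String
  | 0, parts => parts
  | n + 1, parts => if parts.length < 4 then pvPadLoop n (parts ++ [""]) else parts

def parse_interface_code (code : String) : List (String × String) :=
  let parts := (PySem.Str.splitMax? code ";" 3).getD []   -- code.split(';', 3); sep ≠ "" so never none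
  let parts := pvPadLoop 4 parts
  [("sub_system", (PySem.List.pyGet? parts 0).getD ""),
   ("building_level", (PySem.List.pyGet? parts 1).getD ""),
   ("field", (PySem.List.pyGet? parts 2).getD ""),
   ("id", (PySem.List.pyGet? parts 3).getD "")]

-- ===== PORT B =====
-- B's `for ch in code` loop: k counts the separators consumed so far (max 3),
-- each non-separator character is appended to the buffer selected by k
def pvScan : List Char → Nat → List Char → List Char → List Char → List Char →
    List Char × List Char × List Char × List Char
  | [], _, f0, f1, f2, f3 => (f0, f1, f2, f3)
  | c :: rest, k, f0, f1, f2, f3 =>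
      if c = ';' ∧ k < 3 then pvScan rest (k + 1) f0 f1 f2 f3
      else if k = 0 then pvScan rest k (f0 ++ [c]) f1 f2 f3
      else if k = 1 then pvScan rest k f0 (f1 ++ [c]) f2 f3
      else if k = 2 then pvScan rest k f0 f1 (f2 ++ [c]) f3
      else pvScan rest k f0 f1 f2 (f3 ++ [c])

def parse_interface_code_alt (code : String) : List (String × String) :=
  let (f0, f1, f2, f3) := pvScan code.toList 0 [] [] [] []
  [("sub_system", String.ofList f0),
   ("building_level", String.ofList f1),
   ("field", String.ofList f2),
   ("id", String.ofList f3)]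

-- ===== PRECONDITION & SPEC =====
def Spec_parse_interface_code (code : String) (out : List (String × String)) : Prop := out = parse_interface_code_alt code
instance (code : String) (out : List (String × String)) : Decidable (Spec_parse_interface_code code out) := by unfold Spec_parse_interface_code; infer_instance

-- ===== CLAIM (what is proved, stated in full; the proofs are below) =====
def Claim_equal_parse_interface_code : Prop := ∀ (code : String), Dom_parse_interface_code code → Spec_parse_interface_code code (parse_interface_code code)

-- ===== LEMMAS AND PROOFS =====

-- proof helper: (before, sep-if-found, after) around the first ';' of a char list
def pvPartition : List Char → List Char × List Char × List Char
  | [] => ([], [], [])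
  | c :: rest =>
      if c = ';' then ([], [';'], rest)
      else
        let p := pvPartition rest
        (c :: p.1, p.2.1, p.2.2)

-- a fuel-free restatement of PySem.Chars.splitOnMax.go for the 1-char separator ';'
def pvSplitAux : Nat → List Char → List Char → List (List Char) → List (List Char)
  | 0, l, cur, acc => ((cur.reverse ++ l) :: acc).reverse
  | _ + 1, [], cur, acc => (cur.reverse :: acc).reverse
  | m + 1, c :: rest, cur, acc =>
      if c = ';' then pvSplitAux m rest [] (cur.reverse :: acc)
      else pvSplitAux (m + 1) rest (c :: cur) acc

lemma go_eq_pvSplitAux : ∀ (fuel : Nat) (l : List Char), l.length < fuel →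
    ∀ (m : Nat) (cur : List Char) (acc : List (List Char)),
      PySem.Chars.splitOnMax.go [';'] fuel m l cur acc = pvSplitAux m l cur acc := by
  intro fuel
  induction fuel with
  | zero => intro l h; simp at h
  | succ f ih =>
    intro l hl m cur acc
    match m, l with
    | 0, [] => simp [PySem.Chars.splitOnMax.go, pvSplitAux]
    | 0, c :: rest => simp [PySem.Chars.splitOnMax.go, pvSplitAux]
    | m + 1, [] => simp [PySem.Chars.splitOnMax.go, pvSplitAux]
    | m + 1, c :: rest =>
      simp only [PySem.Chars.splitOnMax.go, pvSplitAux]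
      simp only [List.length_cons] at hl
      by_cases hc : c = ';'
      · subst hc
        simp [List.isPrefixOf, ih rest (by omega)]
      · have hpre : [';'].isPrefixOf (c :: rest) = false := by
          simp only [List.isPrefixOf, Bool.and_eq_false_iff, beq_eq_false_iff_ne, ne_eq]
          exact Or.inl fun h => hc h.symm
        simp [hpre, hc, ih rest (by omega)]

lemma pvSplitAux_partition (m : Nat) :
    ∀ (l cur : List Char) (acc : List (List Char)),
      pvSplitAux (m + 1) l cur acc =
        if ';' ∈ l then
          pvSplitAux m (pvPartition l).2.2 [] ((cur.reverse ++ (pvPartition l).1) :: acc)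
        else ((cur.reverse ++ l) :: acc).reverse := by
  intro l
  induction l with
  | nil => intro cur acc; simp [pvSplitAux]
  | cons c rest ih =>
    intro cur acc
    by_cases hc : c = ';'
    · subst hc
      simp [pvSplitAux, pvPartition]
    · have : (';' ∈ c :: rest) = (';' ∈ rest) := by simp [Ne.symm hc]
      simp only [pvSplitAux, if_neg hc, ih, pvPartition, this]
      by_cases hm : ';' ∈ rest
      · simp [hm]
      · simp [hm]

lemma pvSplitAux_three (l : List Char) :
    pvSplitAux 3 l [] [] =
      (let p1 := pvPartition l
       let p2 := pvPartition p1.2.2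
       let p3 := pvPartition p2.2.2
       if ';' ∉ l then [l]
       else if ';' ∉ p1.2.2 then [p1.1, p1.2.2]
       else if ';' ∉ p2.2.2 then [p1.1, p2.1, p2.2.2]
       else [p1.1, p2.1, p3.1, p3.2.2]) := by
  simp only [pvSplitAux_partition]
  by_cases h1 : ';' ∈ l
  · by_cases h2 : ';' ∈ (pvPartition l).2.2
    · by_cases h3 : ';' ∈ (pvPartition (pvPartition l).2.2).2.2
      · simp [h1, h2, h3, pvSplitAux]
      · simp [h1, h2, h3]
    · simp [h1, h2]
  · simp [h1]

lemma pvScan3 : ∀ (l f0 f1 f2 f3 : List Char), pvScan l 3 f0 f1 f2 f3 = (f0, f1, f2, f3 ++ l) := by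
  intro l
  induction l with
  | nil => intro f0 f1 f2 f3; simp [pvScan]
  | cons c rest ih => intro f0 f1 f2 f3; simp [pvScan, ih]

lemma pvScan2 : ∀ (l f0 f1 f2 : List Char),
    pvScan l 2 f0 f1 f2 [] =
      if ';' ∈ l then (f0, f1, f2 ++ (pvPartition l).1, (pvPartition l).2.2)
      else (f0, f1, f2 ++ l, []) := by
  intro l
  induction l with
  | nil => intro f0 f1 f2; simp [pvScan]
  | cons c rest ih =>
    intro f0 f1 f2
    by_cases hc : c = ';'
    · subst hc; simp [pvScan, pvPartition, pvScan3]
    · have hm : (';' ∈ c :: rest) = (';' ∈ rest) := by simp [Ne.symm hc]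
      simp only [pvScan, hc, false_and, if_false, if_neg (by norm_num : ¬ (2:Nat) = 0),
        if_neg (by norm_num : ¬ (2:Nat) = 1), ih, pvPartition, hm]
      by_cases h : ';' ∈ rest <;> simp [h]

lemma pvScan1 : ∀ (l f0 f1 : List Char),
    pvScan l 1 f0 f1 [] [] =
      if ';' ∈ l then pvScan (pvPartition l).2.2 2 f0 (f1 ++ (pvPartition l).1) [] []
      else (f0, f1 ++ l, [], []) := by
  intro l
  induction l with
  | nil => intro f0 f1; simp [pvScan]
  | cons c rest ih =>
    intro f0 f1
    by_cases hc : c = ';'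
    · subst hc; simp [pvScan, pvPartition]
    · have hm : (';' ∈ c :: rest) = (';' ∈ rest) := by simp [Ne.symm hc]
      simp only [pvScan, hc, false_and, if_false, if_neg (by norm_num : ¬ (1:Nat) = 0),
        ih, pvPartition, hm]
      by_cases h : ';' ∈ rest <;> simp [h]

lemma pvScan0 : ∀ (l f0 : List Char),
    pvScan l 0 f0 [] [] [] =
      if ';' ∈ l then pvScan (pvPartition l).2.2 1 (f0 ++ (pvPartition l).1) [] [] []
      else (f0 ++ l, [], [], []) := by
  intro l
  induction l with
  | nil => intro f0; simp [pvScan]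
  | cons c rest ih =>
    intro f0
    by_cases hc : c = ';'
    · subst hc; simp [pvScan, pvPartition]
    · have hm : (';' ∈ c :: rest) = (';' ∈ rest) := by simp [Ne.symm hc]
      simp only [pvScan, hc, false_and, if_false, ih, pvPartition, hm]
      by_cases h : ';' ∈ rest <;> simp [h]

theorem parse_interface_code_spec : Claim_equal_parse_interface_code := by
  intro code _
  unfold Spec_parse_interface_code parse_interface_code parse_interface_code_alt
  have hsplit : PySem.Str.splitMax? code ";" 3 =
      some ((pvSplitAux 3 code.toList [] []).map String.ofList) := by
    unfold PySem.Str.splitMax? PySem.Chars.splitMax? PySem.Chars.splitOnMax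
    simp only [show (";").toList = [';'] from rfl]
    norm_num
    rw [go_eq_pvSplitAux (code.length + 1) code.toList (by simp), show Int.toNat 3 = 3 from rfl]
  rw [hsplit]
  rw [pvSplitAux_three code.toList]
  rw [pvScan0]
  by_cases h1 : ';' ∈ code.toList
  · rw [if_pos h1, pvScan1]
    by_cases h2 : ';' ∈ (pvPartition code.toList).2.2
    · rw [if_pos h2, pvScan2]
      by_cases h3 : ';' ∈ (pvPartition (pvPartition code.toList).2.2).2.2
      · simp [h1, h2, h3, pvPadLoop, PySem.List.pyGet?, PySem.List.pyIdx?]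
      · simp [h1, h2, h3, pvPadLoop, PySem.List.pyGet?, PySem.List.pyIdx?]
    · simp [h1, h2, pvPadLoop, PySem.List.pyGet?, PySem.List.pyIdx?]
  · simp [h1, pvPadLoop, PySem.List.pyGet?, PySem.List.pyIdx?]
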